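-- pv_equiv track=rewrite | github.com/v13nyses/TD-Webinar | dashboard/form_fields.py | parse_date_offset_string
-- ===== SOURCE A (Python) =====
-- def parse_date_offset_string(offset_hms):
--   if offset_hms != '':
--     offset_components = offset_hms.split(':')
--     offset_seconds = 0
--     for i in range(0, len(offset_components)):
--       offset_seconds += int(offset_components[i]) * 60**(len(offset_components) - i - 1)
--
--     return offset_seconds
--
--   else:
--     return 0
-- ===== SOURCE B (Python) =====
-- def parse_date_offset_string(offset_hms):
--   if offset_hms != '':
--     result = 0
--     for comp in offset_hms.split(':'):
--       result = result * 60 + int(comp)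
--     return result
--   else:
--     return 0
-- ===== Notes on version B (the rewrite author's own statement) =====
-- stated objective: idiomatic
-- what changed: Replaces the power-weighted sum (int(c)*60**(n-1-i) per component) with a single left-to-right Horner fold maintaining one running accumulator and no exponentiation.
import Mathlib
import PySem

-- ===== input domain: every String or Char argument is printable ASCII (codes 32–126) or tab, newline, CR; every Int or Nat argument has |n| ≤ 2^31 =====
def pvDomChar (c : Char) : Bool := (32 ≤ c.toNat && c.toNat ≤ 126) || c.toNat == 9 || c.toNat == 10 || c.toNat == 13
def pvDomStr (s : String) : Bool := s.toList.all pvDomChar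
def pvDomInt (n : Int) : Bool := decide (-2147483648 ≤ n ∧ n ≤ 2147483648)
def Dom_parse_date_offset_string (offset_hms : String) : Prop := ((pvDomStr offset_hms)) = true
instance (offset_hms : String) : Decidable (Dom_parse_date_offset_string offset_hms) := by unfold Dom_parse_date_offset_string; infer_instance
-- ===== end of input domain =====

-- B replaces A's power-weighted sum with a Horner fold (one accumulator, no exponentiation); same values, same cost class.

-- ===== PORT A =====
def parse_date_offset_string (offset_hms : String) : Int :=
  if offset_hms ≠ "" then
    let offset_components := (PySem.Str.split? offset_hms ":").getD []
    let n : Int := offset_components.length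
    (PySem.List.pyRange 0 n 1).foldl
      (fun offset_seconds i =>
        offset_seconds +
          (PySem.Int.ofStr? (PySem.List.pyGetD offset_components i "")).getD 0 * 60 ^ ((n - 1 - i).toNat))
      0
  else 0

-- ===== PORT B =====
def parse_date_offset_string_alt (offset_hms : String) : Int :=
  if offset_hms ≠ "" then
    ((PySem.Str.split? offset_hms ":").getD []).foldl
      (fun result comp => result * 60 + (PySem.Int.ofStr? comp).getD 0) 0
  else 0

-- ===== PRECONDITION & SPEC =====
-- Pre_ excludes exactly the inputs where Python's int(component) raises ValueError (a non-integer component).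
def Pre_parse_date_offset_string (offset_hms : String) : Prop :=
  offset_hms = "" ∨ ((PySem.Str.split? offset_hms ":").getD []).all (fun c => (PySem.Int.ofStr? c).isSome) = true
instance (offset_hms : String) : Decidable (Pre_parse_date_offset_string offset_hms) := by
  unfold Pre_parse_date_offset_string; infer_instance
def pvWitness_parse_date_offset_string : String := "1:02:3"
def Spec_parse_date_offset_string (offset_hms : String) (out : Int) : Prop := out = parse_date_offset_string_alt offset_hms
instance (offset_hms : String) (out : Int) : Decidable (Spec_parse_date_offset_string offset_hms out) := by unfold Spec_parse_date_offset_string; infer_instance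

-- ===== CLAIM (what is proved, stated in full; the proofs are below) =====
def Claim_equal_parse_date_offset_string : Prop := ∀ (offset_hms : String), Dom_parse_date_offset_string offset_hms → Pre_parse_date_offset_string offset_hms → Spec_parse_date_offset_string offset_hms (parse_date_offset_string offset_hms)

-- ===== LEMMAS AND PROOFS =====

-- A's index-and-power fold equals the Horner fold, generalised over a power offset e and start acc.
theorem pv_gen (l : List String) (e : Nat) (acc : Int) :
    (PySem.List.pyRange 0 (l.length : Int) 1).foldl
      (fun a i =>
        a + (PySem.Int.ofStr? (PySem.List.pyGetD l i "")).getD 0 * 60 ^ (((l.length : Int) - 1 - i).toNat + e))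
      acc
    = acc + (l.foldl (fun r c => r * 60 + (PySem.Int.ofStr? c).getD 0) 0) * 60 ^ e := by
  induction l using List.reverseRecOn generalizing e acc with
  | nil => simp [PySem.List.pyRange_one_eq_nil]
  | append_singleton t c ih =>
    have hm : (t.length : Int) ≤ (t.length : Int) + 1 := by omega
    have hlen : ((t ++ [c]).length : Int) = (t.length : Int) + 1 := by simp
    rw [hlen, PySem.List.pyRange_one_succ_right (by positivity), List.foldl_append]
    have hstep :
        (PySem.List.pyRange 0 (t.length : Int) 1).foldl
          (fun a i =>
            a + (PySem.Int.ofStr? (PySem.List.pyGetD (t ++ [c]) i "")).getD 0 *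
              60 ^ (((t.length : Int) + 1 - 1 - i).toNat + e)) acc
        = (PySem.List.pyRange 0 (t.length : Int) 1).foldl
          (fun a i =>
            a + (PySem.Int.ofStr? (PySem.List.pyGetD t i "")).getD 0 *
              60 ^ (((t.length : Int) - 1 - i).toNat + (e + 1))) acc := by
      apply PySem.List.foldl_congr_mem
      intro a i hi
      have hb := (PySem.List.mem_pyRange_one).1 hi
      have h0 : (0 : Int) ≤ i := by omega
      have h1 : i < (t.length : Int) := by omega
      have hg : PySem.List.pyGetD (t ++ [c]) i "" = PySem.List.pyGetD t i "" := by
        rw [PySem.List.pyGetD_eq_getElem _ _ h0 (by simpa using by omega),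
            PySem.List.pyGetD_eq_getElem _ _ h0 (by simpa using h1),
            List.getElem_append_left]
      have he : ((t.length : Int) + 1 - 1 - i).toNat + e = ((t.length : Int) - 1 - i).toNat + (e + 1) := by
        omega
      rw [hg, he]
    rw [hstep, ih]
    simp [PySem.List.pyGetD_natCast, pow_succ]
    ring

-- ===== VERDICT (by name: the statement is the Claim_ definition above) =====
theorem parse_date_offset_string_spec : Claim_equal_parse_date_offset_string := by
  intro s _ _
  unfold Spec_parse_date_offset_string parse_date_offset_string parse_date_offset_string_alt
  by_cases hs : s = ""
  · simp [hs]
  · simp only [hs, ne_eq, not_false_eq_true, if_pos]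
    have := pv_gen ((PySem.Str.split? s ":").getD []) 0 0
    simpa using this
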